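-- pv_equiv track=rewrite | github.com/monic/AlgortimosEscalonar | sstf.py | __menor_distancia
-- ===== SOURCE A (Python) =====
-- import math
--
-- def __menor_distancia(posicao_atual, requisicoes):
--     """
--     Metodo privado da classe que retorna o indice da proxima requisicao
--     a ser atendida, ou seja, a requisicao com menor deslocamento do braco
--     """
--
--     # Configura a menor distancia como a maior entre as restantes mais 1
--     menor = int(math.fabs(posicao_atual - max(requisicoes))) + 1
--     indice_menor = -1
--
--     # Busca a requisicao com menor deslocamento do braco
--     for indice, requisicao in enumerate(requisicoes):
--         distancia = int(math.fabs(requisicao - posicao_atual))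
--         if distancia < menor:
--             menor = distancia
--             indice_menor = indice
--
--     # Retorna o indice da requisicao com menor deslocamento do braco
--     return indice_menor
-- ===== SOURCE B (Python) =====
-- import math
--
-- def __menor_distancia(posicao_atual, requisicoes):
--     """Build the full distance table once, then take the first index of its minimum."""
--     distancias = [int(math.fabs(r - posicao_atual)) for r in requisicoes]
--     return distancias.index(min(distancias))
-- ===== Notes on version B (the rewrite author's own statement) =====
-- stated objective: simpler
-- what changed: Replaces A's single running-best pass (seeded with a sentinel derived from max(requisicoes)) by building the complete distance table and returning distancias.index(min(distancias)); no sentinel, no manual state.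
import Mathlib
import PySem

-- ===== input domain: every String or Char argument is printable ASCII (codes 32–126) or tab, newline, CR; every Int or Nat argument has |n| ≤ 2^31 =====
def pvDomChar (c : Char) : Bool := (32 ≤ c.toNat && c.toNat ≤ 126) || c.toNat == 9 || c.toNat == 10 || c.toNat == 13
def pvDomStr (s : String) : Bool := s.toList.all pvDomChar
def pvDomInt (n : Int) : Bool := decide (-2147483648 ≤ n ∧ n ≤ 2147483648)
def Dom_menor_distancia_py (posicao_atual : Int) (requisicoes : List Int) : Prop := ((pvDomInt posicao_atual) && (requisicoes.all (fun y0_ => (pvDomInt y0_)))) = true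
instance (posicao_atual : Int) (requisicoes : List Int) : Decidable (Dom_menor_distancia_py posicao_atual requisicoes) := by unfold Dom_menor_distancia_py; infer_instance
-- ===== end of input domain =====

-- B builds the full distance table and returns the first index of its minimum, instead of A's
-- running-best pass seeded with a sentinel derived from max(requisicoes); same value everywhere.

-- ===== PORT A =====
-- the for-loop of A, step for step: state (menor, indice_menor), running index `idx`
def menorLoopA (posicao_atual : Int) : List Int → Nat → Int × Int → Int × Int
  | [], _, st => st
  | requisicao :: rest, idx, (menor, indice_menor) =>
      let distancia : Int := ((requisicao - posicao_atual).natAbs : Int)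
      if distancia < menor then menorLoopA posicao_atual rest (idx + 1) (distancia, (idx : Int))
      else menorLoopA posicao_atual rest (idx + 1) (menor, indice_menor)

def menor_distancia_py (posicao_atual : Int) (requisicoes : List Int) : Int :=
  -- max(requisicoes) raises ValueError on []; Pre_ excludes that, `.getD 0` only totalises
  let mx : Int := (PySem.List.max? requisicoes (fun x => x)).getD 0
  let menor : Int := ((posicao_atual - mx).natAbs : Int) + 1
  (menorLoopA posicao_atual requisicoes 0 (menor, -1)).2

-- ===== PORT B =====
def menor_distancia_py_alt (posicao_atual : Int) (requisicoes : List Int) : Int :=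
  let distancias : List Int := requisicoes.map (fun r => ((r - posicao_atual).natAbs : Int))
  -- min(distancias) raises ValueError on []; Pre_ excludes that, the `none`/`.getD` arms only totalise
  match PySem.List.min? distancias (fun x => x) with
  | none => -1
  | some m => ((PySem.List.index? distancias m).map (fun n => (n : Int))).getD (-1)

-- ===== PRECONDITION & SPEC =====
-- Pre_ excludes the empty request list, on which both A (max([])) and B (min([])) raise ValueError.
def Pre_menor_distancia_py (posicao_atual : Int) (requisicoes : List Int) : Prop := requisicoes ≠ []
instance (posicao_atual : Int) (requisicoes : List Int) : Decidable (Pre_menor_distancia_py posicao_atual requisicoes) := by unfold Pre_menor_distancia_py; infer_instance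
def pvWitness_menor_distancia_py : Int × List Int := (53, [98, 183, 37, 122, 14, 124, 65, 67])

def Spec_menor_distancia_py (posicao_atual : Int) (requisicoes : List Int) (out : Int) : Prop := out = menor_distancia_py_alt posicao_atual requisicoes
instance (posicao_atual : Int) (requisicoes : List Int) (out : Int) : Decidable (Spec_menor_distancia_py posicao_atual requisicoes out) := by unfold Spec_menor_distancia_py; infer_instance

-- ===== CLAIM (what is proved, stated in full; the proofs are below) =====
def Claim_equal_menor_distancia_py : Prop := ∀ (posicao_atual : Int) (requisicoes : List Int), Dom_menor_distancia_py posicao_atual requisicoes → Pre_menor_distancia_py posicao_atual requisicoes → Spec_menor_distancia_py posicao_atual requisicoes (menor_distancia_py posicao_atual requisicoes)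

-- ===== LEMMAS AND PROOFS =====

-- the same loop, over the pre-computed distance list
def menorLoopD : List Int → Nat → Int × Int → Int × Int
  | [], _, st => st
  | d :: rest, idx, (menor, indice_menor) =>
      if d < menor then menorLoopD rest (idx + 1) (d, (idx : Int))
      else menorLoopD rest (idx + 1) (menor, indice_menor)

theorem menorLoopA_eq_D (p : Int) : ∀ (rs : List Int) (k : Nat) (st : Int × Int),
    menorLoopA p rs k st = menorLoopD (rs.map (fun r => ((r - p).natAbs : Int))) k st := by
  intro rs
  induction rs with
  | nil => intro k st; rfl
  | cons r rest ih =>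
      intro k st
      obtain ⟨m, i⟩ := st
      simp only [menorLoopA, menorLoopD, List.map_cons]
      split_ifs <;> exact ih _ _

theorem foldl_min_comm (a b : Int) : ∀ (l : List Int), l.foldl min (min a b) = min a (l.foldl min b) := by
  intro l
  induction l generalizing b with
  | nil => rfl
  | cons c t ih =>
      simp only [List.foldl_cons]
      rw [min_assoc, ih]

theorem min?_id_cons_cons (d r : Int) (rs : List Int) :
    PySem.List.min? (d :: r :: rs) (fun x => x) =
      some (min d ((rs.foldl min r))) := by
  rw [PySem.List.min?_id_cons]
  simp only [List.foldl_cons]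
  rw [← foldl_min_comm]

theorem menorLoopD_cons (d : Int) (rest : List Int) (idx : Nat) (m i : Int) :
    menorLoopD (d :: rest) idx (m, i) =
      if d < m then menorLoopD rest (idx + 1) (d, (idx : Int))
      else menorLoopD rest (idx + 1) (m, i) := rfl

theorem menorLoopD_spec : ∀ (ds : List Int) (k : Nat) (m i : Int),
    menorLoopD ds k (m, i) =
      match PySem.List.min? ds (fun x => x) with
      | none => (m, i)
      | some mn =>
          if mn < m then (mn, (k : Int) + (((PySem.List.index? ds mn).getD 0 : Nat) : Int))
          else (m, i) := by
  intro ds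
  induction ds with
  | nil => intro k m i; rfl
  | cons d rest ih =>
      intro k m i
      cases rest with
      | nil =>
          simp only [menorLoopD, PySem.List.min?_id_cons, List.foldl_nil]
          split_ifs with h
          · simp
          · simp
      | cons r rs =>
          have hmr : PySem.List.min? (r :: rs) (fun x => x) = some (rs.foldl min r) :=
            PySem.List.min?_id_cons r rs
          have hmem : rs.foldl min r ∈ r :: rs := PySem.List.min?_mem hmr
          obtain ⟨j, hj⟩ : ∃ j, PySem.List.index? (r :: rs) (rs.foldl min r) = some j := by
            have : (PySem.List.index? (r :: rs) (rs.foldl min r)).isSome := by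
              rw [PySem.List.index?_isSome_iff]; exact hmem
            exact Option.isSome_iff_exists.mp this
          rw [min?_id_cons_cons, menorLoopD_cons]
          generalize hG : rs.foldl min r = mr at hmr hj
          split_ifs with hd
          · -- distancia d < menor m : recurse with state (d, k)
            rw [ih (k + 1) d (k : Int), hmr]
            by_cases hlt : mr < d
            · have hne : d ≠ mr := by omega
              have hidx : PySem.List.index? (d :: r :: rs) mr = some (j + 1) := by
                rw [PySem.List.index?_cons_of_ne _ hne, hj]; rfl
              have hmin : min d mr = mr := by omega
              rw [hmin]
              simp only [hlt, if_true, if_pos (by omega : mr < m), hidx, hj,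
                Option.getD_some, Prod.mk.injEq]
              refine ⟨by trivial, by push_cast; ring⟩
            · have hmin : min d mr = d := by omega
              rw [hmin]
              simp only [if_neg hlt, if_pos hd]
              rw [PySem.List.index?_cons_self]
              simp
          · -- menor unchanged
            rw [ih (k + 1) m i, hmr]
            by_cases hlt : mr < m
            · have hne : d ≠ mr := by omega
              have hidx : PySem.List.index? (d :: r :: rs) mr = some (j + 1) := by
                rw [PySem.List.index?_cons_of_ne _ hne, hj]; rfl
              have hmin : min d mr = mr := by omega
              rw [hmin]
              simp only [if_pos hlt, hidx, hj, Option.getD_some, Prod.mk.injEq]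
              refine ⟨by trivial, by push_cast; ring⟩
            · have hnm : ¬ min d mr < m := by omega
              simp only [if_neg hlt, if_neg hnm]

-- ===== VERDICT (by name: the statement is the Claim_ definition above) =====
theorem menor_distancia_py_spec : Claim_equal_menor_distancia_py := by
  intro p reqs _ hpre
  simp only [Spec_menor_distancia_py, menor_distancia_py, menor_distancia_py_alt]
  obtain ⟨x, xs, rfl⟩ := List.exists_cons_of_ne_nil hpre
  set ds : List Int := (x :: xs).map (fun r => ((r - p).natAbs : Int)) with hds
  have hmax : PySem.List.max? (x :: xs) (fun y => y) = some (xs.foldl max x) :=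
    PySem.List.max?_id_cons x xs
  set mx : Int := xs.foldl max x with hmx
  have hmxmem : mx ∈ x :: xs := PySem.List.max?_mem hmax
  have hminds : PySem.List.min? ds (fun y => y) = some (xs.map (fun r => ((r - p).natAbs : Int)) |>.foldl min ((x - p).natAbs : Int)) := by
    rw [hds, List.map_cons, PySem.List.min?_id_cons]
  set mn : Int := (xs.map (fun r => ((r - p).natAbs : Int))).foldl min ((x - p).natAbs : Int) with hmn
  have hmnmem : mn ∈ ds := PySem.List.min?_mem hminds
  have hdistmem : ((mx - p).natAbs : Int) ∈ ds := by
    rw [hds]; exact List.mem_map_of_mem hmxmem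
  have hmnle : mn ≤ ((mx - p).natAbs : Int) := PySem.List.min?_isMin hminds _ hdistmem
  obtain ⟨j, hj⟩ : ∃ j, PySem.List.index? ds mn = some j := by
    have : (PySem.List.index? ds mn).isSome := by
      rw [PySem.List.index?_isSome_iff]; exact hmnmem
    exact Option.isSome_iff_exists.mp this
  rw [menorLoopA_eq_D, ← hds, menorLoopD_spec, hminds]
  simp only [hmax, Option.getD_some]
  have habs : ((p - mx).natAbs : Int) = ((mx - p).natAbs : Int) := by
    rw [← Int.natAbs_neg, neg_sub]
  have hlt : mn < ((p - mx).natAbs : Int) + 1 := by rw [habs]; omega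
  simp only [if_pos hlt, hj, Option.getD_some]
  simp
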